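-- pv_equiv track=rewrite | github.com/ttaerrim/algorithm | programmers/131128.py | solution
-- ===== SOURCE A (Python) =====
-- from collections import Counter
--
-- def solution(X, Y):
--     answer = ''
--     x_cnt = Counter(X)
--     y_cnt = Counter(Y)
--     counter = {}
--
--     for i in range(0, 10):
--         count = min(x_cnt[str(i)], y_cnt[str(i)])
--         if count > 0:
--             counter[i] = count
--
--     if counter == {}:
--         return '-1'
--     elif len(counter) == 1 and 0 in counter.keys():
--         return '0'
--
--     for k in reversed(counter):
--         v = counter[k]
--         for _ in range(0, v):
--             answer += str(k)
--     return answer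
-- ===== SOURCE B (Python) =====
-- def solution(X, Y):
--     xs = sorted(c for c in X if '0' <= c <= '9')
--     ys = sorted(c for c in Y if '0' <= c <= '9')
--     common = []
--     i = j = 0
--     while i < len(xs) and j < len(ys):
--         if xs[i] == ys[j]:
--             common.append(xs[i])
--             i += 1
--             j += 1
--         elif xs[i] < ys[j]:
--             i += 1
--         else:
--             j += 1
--     if not common:
--         return '-1'
--     common.reverse()
--     if common[0] == '0':
--         return '0'
--     return ''.join(common)
-- ===== Notes on version B (the rewrite author's own statement) =====
-- stated objective: alternative
-- what changed: Replaces Counter bucket-counting over digits 0-9 and a dict of per-digit counts with a sort-then-two-pointer merge intersection of the digit characters of X and Y, building the common multiset in ascending order and reversing it.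
import Mathlib
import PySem

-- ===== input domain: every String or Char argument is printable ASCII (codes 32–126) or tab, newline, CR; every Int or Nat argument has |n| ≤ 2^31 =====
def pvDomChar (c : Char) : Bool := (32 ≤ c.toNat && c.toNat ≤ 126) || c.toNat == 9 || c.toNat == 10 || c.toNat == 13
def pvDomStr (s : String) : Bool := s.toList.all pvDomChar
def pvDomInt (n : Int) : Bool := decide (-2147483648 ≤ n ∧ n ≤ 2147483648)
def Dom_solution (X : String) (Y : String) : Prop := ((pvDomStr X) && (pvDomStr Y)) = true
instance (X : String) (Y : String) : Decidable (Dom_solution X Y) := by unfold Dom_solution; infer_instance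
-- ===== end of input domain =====

-- B replaces A's Counter bucket-count over digits 0–9 with a sort + two-pointer merge
-- intersection of the digit characters (alternative algorithm, not claimed faster).

-- ===== PORT A =====
-- str(i) for i in range(0, 10) is the single digit character (chars model Python's 1-char strings)
def pvDigitChar (i : Int) : Char := Char.ofNat (48 + i.toNat)

def solution (X : String) (Y : String) : String :=
  let answer : List Char := []                                   -- answer = ''
  let x_cnt := PySem.Dict.counter X.toList                       -- Counter(X)
  let y_cnt := PySem.Dict.counter Y.toList                       -- Counter(Y)
  let counter : PySem.Dict Int Int :=                            -- for i in range(0, 10): ...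
    (PySem.List.pyRange 0 10 1).foldl (fun d i =>
      let count := min (x_cnt.getD (pvDigitChar i) 0) (y_cnt.getD (pvDigitChar i) 0)
      if count > 0 then d.insert i count else d) PySem.Dict.empty
  if counter = PySem.Dict.empty then "-1"                        -- counter == {} (vs empty: items equality is exact)
  else if counter.size = 1 ∧ counter.contains 0 = true then "0"  -- len(counter) == 1 and 0 in counter.keys()
  else
    -- for k in reversed(counter): for _ in range(0, v): answer += str(k)
    let answer := counter.items.reverse.foldl (fun ans kv =>
      (PySem.List.pyRange 0 kv.2 1).foldl (fun a _ => a ++ [pvDigitChar kv.1]) ans) answer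
    String.ofList answer

-- ===== PORT B =====
-- the two-pointer while loop over the two sorted lists, as structural recursion
def pvMergeCommon : List Char → List Char → List Char
  | x :: xs, y :: ys =>
    if x = y then x :: pvMergeCommon xs ys
    else if x < y then pvMergeCommon xs (y :: ys)
    else pvMergeCommon (x :: xs) ys
  | _, _ => []

def solution_alt (X : String) (Y : String) : String :=
  let xs := PySem.List.sorted (X.toList.filter (fun c => decide ('0' ≤ c) && decide (c ≤ '9'))) (fun c => c) false
  let ys := PySem.List.sorted (Y.toList.filter (fun c => decide ('0' ≤ c) && decide (c ≤ '9'))) (fun c => c) false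
  let common := pvMergeCommon xs ys
  if common = [] then "-1"
  else
    let commonR := common.reverse
    if commonR.head? = some '0' then "0"
    else String.ofList commonR

-- ===== PRECONDITION & SPEC =====
def Spec_solution (X : String) (Y : String) (out : String) : Prop := out = solution_alt X Y
instance (X : String) (Y : String) (out : String) : Decidable (Spec_solution X Y out) := by unfold Spec_solution; infer_instance

-- ===== CLAIM (what is proved, stated in full; the proofs are below) =====
def Claim_equal_solution : Prop := ∀ (X : String) (Y : String), Dom_solution X Y → Spec_solution X Y (solution X Y)

-- ===== LEMMAS AND PROOFS =====

-- the per-digit common count, as an Int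
def pvM (Xl Yl : List Char) (i : Int) : Int :=
  min ((Xl.count (pvDigitChar i) : Int)) ((Yl.count (pvDigitChar i) : Int))

def pvDigits : List Int := [0, 1, 2, 3, 4, 5, 6, 7, 8, 9]

-- A's dict as a list of items
def pvItems (Xl Yl : List Char) : List (Int × Int) :=
  (pvDigits.filter (fun i => decide (0 < pvM Xl Yl i))).map (fun i => (i, pvM Xl Yl i))

lemma pv_pyRange10 : PySem.List.pyRange 0 10 1 = pvDigits := by decide

lemma pv_foldl_ite_insert (l : List Int) (p : Int → Prop) [DecidablePred p] (v : Int → Int)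
    (d : PySem.Dict Int Int) :
    l.foldl (fun d i => if p i then d.insert i (v i) else d) d
      = (l.filter (fun i => decide (p i))).foldl (fun d i => d.insert i (v i)) d := by
  induction l generalizing d with
  | nil => rfl
  | cons x xs ih =>
      simp only [List.foldl_cons, List.filter_cons]
      by_cases h : p x <;> simp [h, ih]

lemma pv_counter_items (Xl Yl : List Char) :
    ((PySem.List.pyRange 0 10 1).foldl (fun d i =>
        if min ((PySem.Dict.counter Xl).getD (pvDigitChar i) 0)
               ((PySem.Dict.counter Yl).getD (pvDigitChar i) 0) > 0
        then d.insert i (min ((PySem.Dict.counter Xl).getD (pvDigitChar i) 0)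
               ((PySem.Dict.counter Yl).getD (pvDigitChar i) 0))
        else d) PySem.Dict.empty).items
      = pvItems Xl Yl := by
  have hf : (fun (d : PySem.Dict Int Int) (i : Int) =>
        if min ((PySem.Dict.counter Xl).getD (pvDigitChar i) 0)
               ((PySem.Dict.counter Yl).getD (pvDigitChar i) 0) > 0
        then d.insert i (min ((PySem.Dict.counter Xl).getD (pvDigitChar i) 0)
               ((PySem.Dict.counter Yl).getD (pvDigitChar i) 0))
        else d)
      = fun d i => if 0 < pvM Xl Yl i then d.insert i (pvM Xl Yl i) else d := by
    funext d i
    simp only [PySem.Dict.getD_counter, pvM]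
  rw [hf, pv_pyRange10,
    pv_foldl_ite_insert pvDigits (fun i => 0 < pvM Xl Yl i) (pvM Xl Yl) PySem.Dict.empty,
    PySem.Dict.items_foldl_insert_fresh _ (fun a => a) _ _ (by simp [PySem.Dict.contains_empty])
      (by simpa using ((by decide : pvDigits.Nodup).filter _))]
  simp [pvItems, PySem.Dict.empty]

-- ===== merge lemmas =====
lemma pvMerge_nil_right (xs : List Char) : pvMergeCommon xs [] = [] := by
  cases xs <;> simp [pvMergeCommon]

lemma pvMerge_skipR (c : Char) (xs : List Char) (b : Nat) (ys : List Char)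
    (h : ∀ x ∈ xs, c < x) :
    pvMergeCommon xs (List.replicate b c ++ ys) = pvMergeCommon xs ys := by
  induction b with
  | zero => rfl
  | succ b ih =>
      cases xs with
      | nil => simp [pvMergeCommon]
      | cons x xs' =>
          have hx : c < x := h x (by simp)
          simp only [List.replicate_succ, List.cons_append, pvMergeCommon]
          rw [if_neg hx.ne', if_neg (not_lt_of_gt hx)]
          exact ih

lemma pvMerge_skipL (c : Char) (a : Nat) (xs ys : List Char)
    (h : ∀ y ∈ ys, c < y) :
    pvMergeCommon (List.replicate a c ++ xs) ys = pvMergeCommon xs ys := by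
  induction a with
  | zero => rfl
  | succ a ih =>
      cases ys with
      | nil => rw [pvMerge_nil_right, pvMerge_nil_right]
      | cons y ys' =>
          have hy : c < y := h y (by simp)
          simp only [List.replicate_succ, List.cons_append, pvMergeCommon]
          rw [if_neg (ne_of_lt hy), if_pos hy]
          exact ih

lemma pvMerge_rep (c : Char) (a : Nat) :
    ∀ (b : Nat) (xs ys : List Char), (∀ x ∈ xs, c < x) → (∀ y ∈ ys, c < y) →
    pvMergeCommon (List.replicate a c ++ xs) (List.replicate b c ++ ys)
      = List.replicate (min a b) c ++ pvMergeCommon xs ys := by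
  induction a with
  | zero =>
      intro b xs ys hx hy
      simpa using pvMerge_skipR c xs b ys hx
  | succ a ih =>
      intro b xs ys hx hy
      cases b with
      | zero =>
          simpa using pvMerge_skipL c (a + 1) xs ys hy
      | succ b =>
          have hm : min (a + 1) (b + 1) = min a b + 1 := by omega
          rw [hm]
          simp only [List.replicate_succ, List.cons_append, pvMergeCommon]
          simpa using ih b xs ys hx hy

lemma pvMerge_blocks (ds : List Char) (hd : ds.Pairwise (· < ·)) (f g : Char → Nat) :
    pvMergeCommon (ds.flatMap fun c => List.replicate (f c) c)
                  (ds.flatMap fun c => List.replicate (g c) c)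
      = ds.flatMap fun c => List.replicate (min (f c) (g c)) c := by
  induction ds with
  | nil => simp [pvMergeCommon]
  | cons c ds ih =>
      have hlt : ∀ x ∈ ds.flatMap fun c' => List.replicate (f c') c', c < x := by
        intro x hx
        rcases List.mem_flatMap.mp hx with ⟨c', hc', hrep⟩
        rcases List.eq_of_mem_replicate hrep with rfl
        exact (List.pairwise_cons.mp hd).1 _ hc'
      have hlt' : ∀ x ∈ ds.flatMap fun c' => List.replicate (g c') c', c < x := by
        intro x hx
        rcases List.mem_flatMap.mp hx with ⟨c', hc', hrep⟩
        rcases List.eq_of_mem_replicate hrep with rfl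
        exact (List.pairwise_cons.mp hd).1 _ hc'
      simp only [List.flatMap_cons]
      rw [pvMerge_rep c (f c) (g c) _ _ hlt hlt', ih (List.pairwise_cons.mp hd).2]

-- ===== sorted-filter characterization =====
def pvDigitsChars : List Char := ['0','1','2','3','4','5','6','7','8','9']

lemma pv_digitsChars : pvDigits.map pvDigitChar = pvDigitsChars := by decide

lemma pv_isdig_eq (c : Char) :
    (decide ('0' ≤ c) && decide (c ≤ '9')) = decide (c ∈ pvDigitsChars) := by
  have h0 : ('0' ≤ c) ↔ 48 ≤ c.toNat := Iff.rfl
  have h9 : (c ≤ '9') ↔ c.toNat ≤ 57 := Iff.rfl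
  by_cases h : 48 ≤ c.toNat ∧ c.toNat ≤ 57
  · obtain ⟨ha, hb⟩ := h
    have hm : c ∈ pvDigitsChars := by
      interval_cases hc : c.toNat <;>
        · have hofn := Char.ofNat_toNat c
          rw [hc] at hofn
          rw [← hofn]; decide
    simp [h0, h9, ha, hb, hm]
  · have hm : c ∉ pvDigitsChars := by
      intro hmem
      fin_cases hmem <;> exact h (by decide)
    simp only [hm, decide_false]
    simp only [h0, h9, Bool.and_eq_false_iff, decide_eq_false_iff_not]
    omega

lemma pv_perm_filter_blocks (ds : List Char) (hnd : ds.Nodup) (L : List Char) :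
    (L.filter (fun c => decide (c ∈ ds))).Perm
      (ds.flatMap fun c => List.replicate (L.count c) c) := by
  induction ds generalizing L with
  | nil => simp
  | cons d ds ih =>
      have hdnmem : d ∉ ds := (List.nodup_cons.mp hnd).1
      have hsplit := (List.filter_append_perm (fun x => x == d)
        (L.filter (fun c => decide (c ∈ d :: ds)))).symm
      have hA : (L.filter (fun c => decide (c ∈ d :: ds))).filter (fun x => x == d)
          = List.replicate (L.count d) d := by
        rw [List.filter_filter]
        rw [show (fun c => ((c == d) && decide (c ∈ d :: ds))) = (fun c => c == d) from ?_]
        · exact List.filter_beq ..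
        · funext c
          by_cases hc : c = d <;> simp [hc]
      have hB : (L.filter (fun c => decide (c ∈ d :: ds))).filter (fun x => !(x == d))
          = L.filter (fun c => decide (c ∈ ds)) := by
        rw [List.filter_filter]
        apply List.filter_congr
        intro c _
        by_cases hc : c = d
        · subst hc; simp [hdnmem]
        · simp [hc]
      rw [hA, hB] at hsplit
      simpa using hsplit.trans (List.Perm.append (List.Perm.refl _) (ih (List.nodup_cons.mp hnd).2 L))

lemma pv_blocks_pairwise (ds : List Char) (hd : ds.Pairwise (· < ·)) (f : Char → Nat) :
    (ds.flatMap fun c => List.replicate (f c) c).Pairwise (· ≤ ·) := by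
  induction ds with
  | nil => simp
  | cons c ds ih =>
      simp only [List.flatMap_cons]
      rw [List.pairwise_append]
      refine ⟨List.pairwise_replicate.mpr (by simp), ih (List.pairwise_cons.mp hd).2, ?_⟩
      intro a ha b hb
      rcases List.eq_of_mem_replicate ha with rfl
      rcases List.mem_flatMap.mp hb with ⟨c', hc', hrep⟩
      rcases List.eq_of_mem_replicate hrep with rfl
      exact le_of_lt ((List.pairwise_cons.mp hd).1 _ hc')

lemma pv_sorted_filter (L : List Char) :
    PySem.List.sorted (L.filter (fun c => decide ('0' ≤ c) && decide (c ≤ '9'))) (fun c => c) false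
      = pvDigits.flatMap fun i => List.replicate (L.count (pvDigitChar i)) (pvDigitChar i) := by
  have hrw : (pvDigits.flatMap fun i => List.replicate (L.count (pvDigitChar i)) (pvDigitChar i))
      = pvDigitsChars.flatMap fun c => List.replicate (L.count c) c := by
    rw [← pv_digitsChars, List.flatMap_map]
  rw [hrw]
  apply PySem.List.sorted_id_eq_of_perm_of_pairwise
  · refine List.Perm.symm ?_
    have hfe : L.filter (fun c => decide ('0' ≤ c) && decide (c ≤ '9'))
        = L.filter (fun c => decide (c ∈ pvDigitsChars)) := by
      apply List.filter_congr
      intro c _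
      exact pv_isdig_eq c
    rw [hfe]
    exact pv_perm_filter_blocks pvDigitsChars (by decide) L
  · exact pv_blocks_pairwise pvDigitsChars (by decide) _

lemma pv_flatMap_filter (l : List Int) (p : Int → Bool) (f : Int → List Char)
    (h : ∀ x ∈ l, p x = false → f x = []) :
    (l.filter p).flatMap f = l.flatMap f := by
  induction l with
  | nil => rfl
  | cons x xs ih =>
      cases hp : p x with
      | true => simp [hp, ih (fun y hy => h y (List.mem_cons_of_mem _ hy))]
      | false =>
          simp [hp, h x List.mem_cons_self hp,
            ih (fun y hy => h y (List.mem_cons_of_mem _ hy))]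

lemma pv_toNat_M (Xl Yl : List Char) (i : Int) :
    (pvM Xl Yl i).toNat = min (Xl.count (pvDigitChar i)) (Yl.count (pvDigitChar i)) := by
  unfold pvM
  omega

-- main normal form: B's ascending common list
lemma pv_common_eq (Xl Yl : List Char) :
    pvMergeCommon
      (PySem.List.sorted (Xl.filter (fun c => decide ('0' ≤ c) && decide (c ≤ '9'))) (fun c => c) false)
      (PySem.List.sorted (Yl.filter (fun c => decide ('0' ≤ c) && decide (c ≤ '9'))) (fun c => c) false)
      = (pvItems Xl Yl).flatMap fun kv => List.replicate kv.2.toNat (pvDigitChar kv.1) := by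
  rw [pv_sorted_filter Xl, pv_sorted_filter Yl]
  rw [show (pvDigits.flatMap fun i => List.replicate (Xl.count (pvDigitChar i)) (pvDigitChar i))
      = pvDigitsChars.flatMap fun c => List.replicate (Xl.count c) c from by
    rw [← pv_digitsChars, List.flatMap_map]]
  rw [show (pvDigits.flatMap fun i => List.replicate (Yl.count (pvDigitChar i)) (pvDigitChar i))
      = pvDigitsChars.flatMap fun c => List.replicate (Yl.count c) c from by
    rw [← pv_digitsChars, List.flatMap_map]]
  rw [pvMerge_blocks pvDigitsChars (by decide) (fun c => Xl.count c) (fun c => Yl.count c)]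
  rw [show ((pvItems Xl Yl).flatMap fun kv => List.replicate kv.2.toNat (pvDigitChar kv.1))
      = (pvDigits.filter (fun i => decide (0 < pvM Xl Yl i))).flatMap
          (fun i => List.replicate (pvM Xl Yl i).toNat (pvDigitChar i)) from by
    unfold pvItems
    rw [List.flatMap_map]]
  rw [pv_flatMap_filter _ _ _ (by
    intro i _ hpi
    have : ¬ 0 < pvM Xl Yl i := by simpa using hpi
    have h0 : (pvM Xl Yl i).toNat = 0 := by omega
    rw [h0, List.replicate_zero])]
  rw [show (fun i => List.replicate (pvM Xl Yl i).toNat (pvDigitChar i))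
      = (fun i => List.replicate (min (Xl.count (pvDigitChar i)) (Yl.count (pvDigitChar i)))
          (pvDigitChar i)) from funext (fun i => by rw [pv_toNat_M])]
  rw [← pv_digitsChars, List.flatMap_map]

lemma pv_items_mem (Xl Yl : List Char) :
    ∀ kv ∈ pvItems Xl Yl, 0 < kv.2 ∧ kv.1 ∈ pvDigits := by
  intro kv hkv
  simp only [pvItems, List.mem_map, List.mem_filter, decide_eq_true_eq] at hkv
  obtain ⟨i, ⟨hi, hp⟩, rfl⟩ := hkv
  exact ⟨hp, hi⟩

lemma pv_F_nil (Xl Yl : List Char) :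
    ((pvItems Xl Yl).flatMap fun kv => List.replicate kv.2.toNat (pvDigitChar kv.1)) = []
      ↔ pvItems Xl Yl = [] := by
  constructor
  · intro h
    cases hI : pvItems Xl Yl with
    | nil => rfl
    | cons kv rest =>
        have hmem : kv ∈ pvItems Xl Yl := by rw [hI]; exact List.mem_cons_self
        have hpos := (pv_items_mem Xl Yl kv hmem).1
        rw [hI] at h
        have h2 := List.flatMap_eq_nil_iff.mp h kv List.mem_cons_self
        have h3 : kv.2.toNat = 0 := by simpa using h2
        omega
  · intro h; rw [h]; rfl

lemma pv_F_rev (I : List (Int × Int)) :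
    (I.flatMap fun kv => List.replicate kv.2.toNat (pvDigitChar kv.1)).reverse
      = I.reverse.flatMap fun kv => List.replicate kv.2.toNat (pvDigitChar kv.1) := by
  rw [List.reverse_flatMap]
  rw [show (List.reverse ∘ fun kv : Int × Int => List.replicate kv.2.toNat (pvDigitChar kv.1))
      = (fun kv : Int × Int => List.replicate kv.2.toNat (pvDigitChar kv.1)) from
    funext (fun kv => List.reverse_replicate ..)]

lemma pv_inner (ch : Char) (l : List Int) : ∀ (ans : List Char),
    l.foldl (fun a _ => a ++ [ch]) ans = ans ++ List.replicate l.length ch := by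
  induction l with
  | nil => intro ans; simp
  | cons x xs ih =>
      intro ans
      simp only [List.foldl_cons, List.length_cons, ih, List.replicate_succ]
      simp

lemma pv_keys (Xl Yl : List Char) :
    (pvItems Xl Yl).map (·.1) = pvDigits.filter (fun i => decide (0 < pvM Xl Yl i)) := by
  simp [pvItems, List.map_map, Function.comp_def]

lemma pv_dchar_zero (i : Int) (h : i ∈ pvDigits) : pvDigitChar i = '0' ↔ i = 0 := by
  fin_cases h <;> decide

lemma pv_cond2 (Xl Yl : List Char) (hne : pvItems Xl Yl ≠ []) :
    ((pvItems Xl Yl).length = 1 ∧ (0 : Int) ∈ (pvItems Xl Yl).map (·.1))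
      ↔ ((pvItems Xl Yl).flatMap fun kv =>
          List.replicate kv.2.toNat (pvDigitChar kv.1)).reverse.head? = some '0' := by
  obtain ⟨kv, rest, hrev⟩ : ∃ kv rest, (pvItems Xl Yl).reverse = kv :: rest := by
    cases h : (pvItems Xl Yl).reverse with
    | nil => exact absurd (List.reverse_eq_nil_iff.mp h) hne
    | cons a b => exact ⟨a, b, rfl⟩
  have hkvmem : kv ∈ pvItems Xl Yl := by
    have : kv ∈ (pvItems Xl Yl).reverse := by rw [hrev]; exact List.mem_cons_self
    simpa using this
  obtain ⟨hpos, hdig⟩ := pv_items_mem Xl Yl kv hkvmem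
  have hhead : ((pvItems Xl Yl).flatMap fun kv =>
      List.replicate kv.2.toNat (pvDigitChar kv.1)).reverse.head? = some (pvDigitChar kv.1) := by
    rw [pv_F_rev, hrev, List.flatMap_cons]
    obtain ⟨n, hn⟩ : ∃ n, kv.2.toNat = n + 1 := ⟨kv.2.toNat - 1, by omega⟩
    rw [hn, List.replicate_succ]
    rfl
  rw [hhead]
  have hzero := pv_dchar_zero kv.1 hdig
  constructor
  · rintro ⟨hlen, hmem⟩
    obtain ⟨a, ha⟩ := List.length_eq_one_iff.mp hlen
    rw [ha] at hrev hmem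
    simp only [List.reverse_singleton, List.cons.injEq] at hrev
    obtain ⟨heq, -⟩ := hrev
    have h0 : kv.1 = 0 := by rw [← heq]; simp at hmem; omega
    rw [hzero.mpr h0]
  · intro hh
    have h0 : kv.1 = 0 := hzero.mp (Option.some.injEq .. ▸ hh)
    -- keys are strictly increasing and nonnegative, and the LAST key is 0, so there is only one item
    have hKpair : ((pvItems Xl Yl).map (·.1)).Pairwise (· < ·) := by
      rw [pv_keys]
      exact List.Pairwise.sublist List.filter_sublist (by decide)
    have hKrev : ((pvItems Xl Yl).reverse.map (·.1)).Pairwise (fun a b => b < a) := by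
      rw [List.map_reverse]
      exact (List.pairwise_reverse).mpr hKpair
    rw [hrev, List.map_cons] at hKrev
    have hrest : rest.map (·.1) = [] := by
      rw [List.eq_nil_iff_forall_not_mem]
      intro k hk
      have hklt : k < kv.1 := (List.pairwise_cons.mp hKrev).1 k hk
      have hkmem : k ∈ (pvItems Xl Yl).map (·.1) := by
        have h1 : k ∈ (kv :: rest).map (·.1) := List.mem_cons_of_mem _ hk
        rw [← hrev, List.map_reverse] at h1
        simpa using h1
      have hkdig : k ∈ pvDigits := by
        rw [pv_keys] at hkmem
        exact List.mem_of_mem_filter hkmem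
      have : (0 : Int) ≤ k := by fin_cases hkdig <;> decide
      omega
    have hrestnil : rest = [] := List.map_eq_nil_iff.mp hrest
    subst hrestnil
    have hsing : pvItems Xl Yl = [kv] := by
      have := congrArg List.reverse hrev
      simpa using this
    refine ⟨by rw [hsing]; rfl, ?_⟩
    rw [hsing]
    simp [h0]

theorem pv_main (X Y : String) : solution X Y = solution_alt X Y := by
  have hD : ((PySem.List.pyRange 0 10 1).foldl (fun d i =>
        if min ((PySem.Dict.counter X.toList).getD (pvDigitChar i) 0)
               ((PySem.Dict.counter Y.toList).getD (pvDigitChar i) 0) > 0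
        then d.insert i (min ((PySem.Dict.counter X.toList).getD (pvDigitChar i) 0)
               ((PySem.Dict.counter Y.toList).getD (pvDigitChar i) 0))
        else d) PySem.Dict.empty)
      = PySem.Dict.mk (pvItems X.toList Y.toList) := by
    apply PySem.Dict.ext
    rw [pv_counter_items]
  simp only [solution, solution_alt]
  rw [hD, pv_common_eq X.toList Y.toList]
  by_cases hI : pvItems X.toList Y.toList = []
  · rw [if_pos (by rw [hI]; rfl), if_pos ((pv_F_nil X.toList Y.toList).mpr hI)]
  · have hF : ((pvItems X.toList Y.toList).flatMap fun kv =>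
        List.replicate kv.2.toNat (pvDigitChar kv.1)) ≠ [] :=
      fun h => hI ((pv_F_nil X.toList Y.toList).mp h)
    rw [if_neg (fun h => hI (by simpa [PySem.Dict.ext_iff] using h)), if_neg hF]
    have hcond : ((PySem.Dict.mk (pvItems X.toList Y.toList)).size = 1 ∧
        (PySem.Dict.mk (pvItems X.toList Y.toList)).contains 0 = true)
        ↔ (((pvItems X.toList Y.toList).flatMap fun kv =>
            List.replicate kv.2.toNat (pvDigitChar kv.1)).reverse.head? = some '0') := by
      rw [← pv_cond2 X.toList Y.toList hI]
      constructor
      · rintro ⟨h1, h2⟩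
        exact ⟨h1, by simpa using (PySem.Dict.contains_iff_mem_keys _ _).mp h2⟩
      · rintro ⟨h1, h2⟩
        exact ⟨h1, (PySem.Dict.contains_iff_mem_keys _ _).mpr (by simpa using h2)⟩
    have hout : String.ofList ((PySem.Dict.mk (pvItems X.toList Y.toList)).items.reverse.foldl
        (fun ans kv => (PySem.List.pyRange 0 kv.2 1).foldl (fun a _ => a ++ [pvDigitChar kv.1]) ans)
        []) = String.ofList ((pvItems X.toList Y.toList).flatMap fun kv =>
          List.replicate kv.2.toNat (pvDigitChar kv.1)).reverse := by
      congr 1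
      rw [show (fun (ans : List Char) (kv : Int × Int) =>
            (PySem.List.pyRange 0 kv.2 1).foldl (fun a _ => a ++ [pvDigitChar kv.1]) ans)
          = (fun (ans : List Char) (kv : Int × Int) =>
            ans ++ List.replicate kv.2.toNat (pvDigitChar kv.1)) from
        funext fun ans => funext fun kv => by
          rw [pv_inner (pvDigitChar kv.1) (PySem.List.pyRange 0 kv.2 1) ans,
            PySem.List.length_pyRange_one]
          norm_num]
      rw [PySem.List.foldl_append_eq_flatMap, pv_F_rev]
      rfl
    exact if_congr hcond rfl hout

-- ===== VERDICT (by name: the statement is the Claim_ definition above) =====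
theorem solution_spec : Claim_equal_solution := by
  intro X Y _
  unfold Spec_solution
  exact pv_main X Y
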